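-- pv_equiv track=rewrite | github.com/cuenca-mx/agave | agave/fastapi/middlewares/request_logger.py | obfuscate_sensitive_headers
-- ===== SOURCE A (Python) =====
-- from typing import Any, Union
--
-- EXCLUDED_HEADERS: list[str] = ['connection']
--
-- def obfuscate_sensitive_headers(
--     headers: dict[str, Any], sensitive_headers: list[str]
-- ) -> dict[str, Any]:
--     obfuscated_headers = headers.copy()
--
--     for header in EXCLUDED_HEADERS:
--         obfuscated_headers.pop(header.lower(), None)
--
--     for header in sensitive_headers:
--         if header.lower() in obfuscated_headers:
--             header_value = obfuscated_headers[header.lower()]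
--             if len(header_value) > 4:
--                 obfuscated_headers[header.lower()] = (
--                     '*' * 5 + header_value[-4:]
--                 )
--     return obfuscated_headers
-- ===== SOURCE B (Python) =====
-- EXCLUDED_HEADERS: list[str] = ['connection']
--
-- def obfuscate_sensitive_headers(headers, sensitive_headers):
--     excluded = {h.lower() for h in EXCLUDED_HEADERS}
--     sensitive = {h.lower() for h in sensitive_headers}
--     result = {}
--     for key, value in headers.items():
--         if key in excluded:
--             continue
--         if key in sensitive and len(value) > 4:
--             result[key] = '*' * 5 + value[-4:]
--         else:
--             result[key] = value
--     return result
-- ===== Notes on version B (the rewrite author's own statement) =====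
-- stated objective: simpler
-- what changed: A copies the dict, pops excluded keys, then loops over sensitive_headers mutating entries in place; B makes a single pass over headers.items() building a fresh dict, skipping keys in a precomputed lowercased excluded set and obfuscating values of keys in a precomputed lowercased sensitive set.
import Mathlib
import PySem

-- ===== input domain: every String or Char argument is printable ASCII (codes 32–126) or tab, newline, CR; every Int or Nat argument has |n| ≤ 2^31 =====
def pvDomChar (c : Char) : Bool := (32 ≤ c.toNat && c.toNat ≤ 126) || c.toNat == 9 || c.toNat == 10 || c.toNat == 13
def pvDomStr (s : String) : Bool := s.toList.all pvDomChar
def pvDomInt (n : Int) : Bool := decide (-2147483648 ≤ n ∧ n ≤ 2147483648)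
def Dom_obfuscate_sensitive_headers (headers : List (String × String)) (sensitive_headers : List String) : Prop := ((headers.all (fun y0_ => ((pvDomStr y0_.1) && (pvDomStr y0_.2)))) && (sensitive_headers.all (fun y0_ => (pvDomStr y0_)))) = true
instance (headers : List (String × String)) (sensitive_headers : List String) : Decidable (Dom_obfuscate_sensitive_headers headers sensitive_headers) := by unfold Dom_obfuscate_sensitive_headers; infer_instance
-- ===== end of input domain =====

-- B replaces A's copy-then-pop-then-loop-over-sensitive_headers (mutating the copied dict)
-- by ONE pass over headers.items() building a fresh dict, with precomputed lowercased sets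
-- of excluded and sensitive names (objective: simpler).  Neither mutates `headers`.

-- ===== PORT A =====
def obfuscate_sensitive_headers (headers : List (String × String)) (sensitive_headers : List String) : List (String × String) :=
  -- obfuscated_headers = headers.copy()
  let d0 : PySem.Dict String String := PySem.Dict.mk headers
  -- for header in EXCLUDED_HEADERS: obfuscated_headers.pop(header.lower(), None)
  let d1 := (["connection"] : List String).foldl (fun d h =>
      match d.pop? (PySem.Str.lower h) with
      | some (_, d') => d'
      | none => d) d0
  -- for header in sensitive_headers: …
  let d2 := sensitive_headers.foldl (fun d h =>
      let hl := PySem.Str.lower h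
      match d.get? hl with
      | some v =>
          if 4 < PySem.Str.len v then
            d.insert hl ("*****" ++ PySem.Str.slice v (some (-4)) none)
          else d
      | none => d) d1
  d2.items

-- ===== PORT B =====
def obfuscate_sensitive_headers_alt (headers : List (String × String)) (sensitive_headers : List String) : List (String × String) :=
  let excluded : PySem.Set String := PySem.Set.ofList ((["connection"] : List String).map PySem.Str.lower)
  let sens : PySem.Set String := PySem.Set.ofList (sensitive_headers.map PySem.Str.lower)
  let result := headers.foldl (fun (r : PySem.Dict String String) kv =>
      if excluded.contains kv.1 then r
      else if sens.contains kv.1 && decide (4 < PySem.Str.len kv.2) then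
        r.insert kv.1 ("*****" ++ PySem.Str.slice kv.2 (some (-4)) none)
      else r.insert kv.1 kv.2) PySem.Dict.empty
  result.items

-- ===== PRECONDITION & SPEC =====
-- Pre_ excludes association lists whose keys are not pairwise distinct: the `headers`
-- argument of A is a Python dict, whose keys are always unique, so a duplicate-key
-- list does not represent any actual input of A.
def Pre_obfuscate_sensitive_headers (headers : List (String × String)) (sensitive_headers : List String) : Prop :=
  (headers.map Prod.fst).Nodup
instance (headers : List (String × String)) (sensitive_headers : List String) : Decidable (Pre_obfuscate_sensitive_headers headers sensitive_headers) := by unfold Pre_obfuscate_sensitive_headers; infer_instance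

def pvWitness_obfuscate_sensitive_headers : (List (String × String)) × List String :=
  ([("authorization", "secret-token"), ("host", "example.com"), ("connection", "keep-alive")], ["Authorization"])

def Spec_obfuscate_sensitive_headers (headers : List (String × String)) (sensitive_headers : List String) (out : List (String × String)) : Prop := out = obfuscate_sensitive_headers_alt headers sensitive_headers
instance (headers : List (String × String)) (sensitive_headers : List String) (out : List (String × String)) : Decidable (Spec_obfuscate_sensitive_headers headers sensitive_headers out) := by unfold Spec_obfuscate_sensitive_headers; infer_instance

-- ===== CLAIM (what is proved, stated in full; the proofs are below) =====
def Claim_equal_obfuscate_sensitive_headers : Prop := ∀ (headers : List (String × String)) (sensitive_headers : List String), Dom_obfuscate_sensitive_headers headers sensitive_headers → Pre_obfuscate_sensitive_headers headers sensitive_headers → Spec_obfuscate_sensitive_headers headers sensitive_headers (obfuscate_sensitive_headers headers sensitive_headers)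

-- ===== LEMMAS AND PROOFS =====

-- the obfuscated value '*'*5 + v[-4:]
def pvObf (v : String) : String := "*****" ++ PySem.Str.slice v (some (-4)) none

lemma pvObf_def (v : String) : pvObf v = "*****" ++ PySem.Str.slice v (some (-4)) none := rfl

-- the per-entry transformation both programs apply to a kept entry
def pvMark (S : PySem.Set String) (p : String × String) : String × String :=
  if S.contains p.1 && decide (4 < PySem.Str.len p.2) then (p.1, pvObf p.2) else p

lemma pvObf_toList (v : String) :
    (pvObf v).toList = "*****".toList ++ v.toList.drop (v.toList.length - 4) := by
  simp [pvObf, PySem.Str.slice]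
  rw [PySem.List.slice_from_neg_ofNat _ 4 (by omega), String.length_toList]

lemma pvLen_iff (v : String) : 4 < PySem.Str.len v ↔ 4 < v.length := by
  simp [PySem.Str.len, String.length_toList]

lemma pvObf_len (v : String) (h : 4 < PySem.Str.len v) : PySem.Str.len (pvObf v) = 9 := by
  have h4 : 4 < v.toList.length := by simpa [PySem.Str.len] using h
  rw [String.length_toList] at h4
  simp [PySem.Str.len, pvObf_toList, String.length_toList]
  omega

lemma pvObf_idem (v : String) (h : 4 < PySem.Str.len v) : pvObf (pvObf v) = pvObf v := by
  have h4 : 4 < v.toList.length := by simpa [PySem.Str.len] using h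
  rw [String.length_toList] at h4
  apply String.toList_inj.mp
  rw [pvObf_toList, pvObf_toList]
  have hlen : ("*****".toList ++ v.toList.drop (v.toList.length - 4)).length = 9 := by
    simp; omega
  rw [hlen]
  congr 1

lemma pvSetContains (L : List String) (x : String) :
    (PySem.Set.ofList L).contains x = decide (x ∈ L) := by
  by_cases h : x ∈ L <;>
    simp [PySem.Set.contains, PySem.Set.mem_ofList, h]

lemma pvMapSelf {α : Type} (l : List α) (f : α → α) (h : ∀ x ∈ l, f x = x) : l.map f = l :=
  (List.map_congr_left h).trans (List.map_id l)

lemma pvMark_step (hl : String) (L : List String) (p : String × String) :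
    pvMark (PySem.Set.ofList L) (if p.1 == hl && decide (4 < PySem.Str.len p.2) then (p.1, pvObf p.2) else p)
      = pvMark (PySem.Set.ofList (hl :: L)) p := by
  by_cases hp : p.1 = hl
  · by_cases hv : 4 < PySem.Str.len p.2
    · have h9 : 4 < PySem.Str.len (pvObf p.2) := by rw [pvObf_len p.2 hv]; norm_num
      have hv' : 4 < p.2.length := (pvLen_iff _).mp hv
      have hcond : (p.1 == hl && decide (4 < PySem.Str.len p.2)) = true := by
        simp [hp, hv']
      rw [if_pos hcond]
      simp only [pvMark, pvSetContains]
      have hm : p.1 ∈ hl :: L := by rw [hp]; exact List.mem_cons_self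
      rw [decide_eq_true h9, decide_eq_true hv, decide_eq_true hm]
      simp only [Bool.and_true, Bool.true_and]
      by_cases hc : p.1 ∈ L
      · rw [decide_eq_true hc]; simp [pvObf_idem p.2 hv]
      · rw [decide_eq_false hc]; simp
    · have hv' : ¬ 4 < p.2.length := fun hh => hv ((pvLen_iff _).mpr hh)
      simp [pvMark, hv']
  · have hb : (p.1 == hl) = false := by simp [hp]
    simp only [hb, Bool.false_and, Bool.false_eq_true, if_false, pvMark, pvSetContains,
      List.mem_cons]
    by_cases hc : p.1 ∈ L <;> simp [hc, hp]

-- one step of A's sensitive loop, on the items of a nodup-key dict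
lemma pvStepA_items (d : PySem.Dict String String) (hl : String)
    (hnd : d.keys.Nodup) :
    (match d.get? hl with
     | some v => if 4 < PySem.Str.len v then d.insert hl (pvObf v) else d
     | none => d).items
      = d.items.map (fun p => if p.1 == hl && decide (4 < PySem.Str.len p.2) then (p.1, pvObf p.2) else p) := by
  cases hg : d.get? hl with
  | none =>
      have hf : d.items.find? (fun p => p.1 == hl) = none := by
        simp only [PySem.Dict.get?] at hg
        exact Option.map_eq_none_iff.mp hg
      have hno : ∀ p ∈ d.items, (p.1 == hl) = false := by
        intro p hp
        simpa using List.find?_eq_none.mp hf p hp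
      symm
      apply pvMapSelf
      intro p hp
      simp [hno p hp]
  | some v =>
      have hv' : ∀ p ∈ d.items, p.1 = hl → p.2 = v := by
        intro p hp hpk
        have hgv : d.get? p.1 = some p.2 :=
          PySem.Dict.get?_of_mem_items d (by exact hp) hnd
        rw [hpk, hg] at hgv
        exact (Option.some_inj.mp hgv).symm
      by_cases hlen : 4 < PySem.Str.len v
      · have hc : d.contains hl = true := by
          rw [PySem.Dict.contains_eq_isSome_get?, hg]; rfl
        have hlen' : 4 < v.length := (pvLen_iff _).mp hlen
        rw [show (match some v with
             | some v => if 4 < PySem.Str.len v then d.insert hl (pvObf v) else d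
             | none => d) = d.insert hl (pvObf v) from by simp [hlen']]
        rw [PySem.Dict.items_insert_of_contains d _ hc]
        apply List.map_congr_left
        intro p hp
        by_cases hpk : p.1 = hl
        · have h2 : p.2 = v := hv' p hp hpk
          simp [hpk, hlen', h2]
        · simp [hpk]
      · have hlen' : ¬ 4 < v.length := fun hh => hlen ((pvLen_iff _).mpr hh)
        rw [show (match some v with
             | some v => if 4 < PySem.Str.len v then d.insert hl (pvObf v) else d
             | none => d) = d from by simp [hlen']]
        symm
        apply pvMapSelf
        intro p hp
        by_cases hpk : p.1 = hl
        · have h2 : p.2 = v := hv' p hp hpk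
          simp [h2, hlen']
        · simp [hpk]

-- one step of A's sensitive loop keeps the key list unchanged
lemma pvStepA_keys (d : PySem.Dict String String) (hl : String) :
    (match d.get? hl with
     | some v => if 4 < PySem.Str.len v then d.insert hl (pvObf v) else d
     | none => d).keys = d.keys := by
  cases hg : d.get? hl with
  | none => rfl
  | some v =>
      by_cases hlen : 4 < PySem.Str.len v
      · have hc : d.contains hl = true := by
          rw [PySem.Dict.contains_eq_isSome_get?, hg]; rfl
        have hlen' : 4 < v.length := (pvLen_iff _).mp hlen
        rw [show (match some v with
             | some v => if 4 < PySem.Str.len v then d.insert hl (pvObf v) else d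
             | none => d) = d.insert hl (pvObf v) from by simp [hlen']]
        exact PySem.Dict.keys_insert_of_contains d _ hc
      · have hlen' : ¬ 4 < v.length := fun hh => hlen ((pvLen_iff _).mpr hh)
        rw [show (match some v with
             | some v => if 4 < PySem.Str.len v then d.insert hl (pvObf v) else d
             | none => d) = d from by simp [hlen']]

-- A's sensitive loop, fully characterised
lemma pvFoldA_items (hs : List String) (d : PySem.Dict String String)
    (hnd : d.keys.Nodup) :
    (hs.foldl (fun d h =>
        let hl := PySem.Str.lower h
        match d.get? hl with
        | some v =>
            if 4 < PySem.Str.len v then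
              d.insert hl ("*****" ++ PySem.Str.slice v (some (-4)) none)
            else d
        | none => d) d).items
      = d.items.map (pvMark (PySem.Set.ofList (hs.map PySem.Str.lower))) := by
  simp only [← pvObf_def]
  induction hs generalizing d with
  | nil =>
      simp only [List.foldl_nil, List.map_nil]
      symm
      apply pvMapSelf
      intro p hp
      simp [pvMark, pvSetContains, PySem.Set.ofList]
  | cons h hs ih =>
      rw [List.foldl_cons]
      have hnd' : (match d.get? (PySem.Str.lower h) with
          | some v => if 4 < PySem.Str.len v then d.insert (PySem.Str.lower h) (pvObf v) else d
          | none => d).keys.Nodup := by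
        rw [pvStepA_keys]; exact hnd
      rw [ih _ hnd']
      rw [pvStepA_items d (PySem.Str.lower h) hnd]
      rw [List.map_map, List.map_cons]
      apply List.map_congr_left
      intro p _
      exact pvMark_step (PySem.Str.lower h) (hs.map PySem.Str.lower) p

-- A's excluded-headers pop, as a filter of the items
lemma pvPop_eq (d : PySem.Dict String String) (k : String) :
    (match d.pop? k with
     | some (_, d') => d'
     | none => d) = PySem.Dict.mk (d.items.filter (fun p => !(p.1 == k))) := by
  cases hg : d.get? k with
  | none =>
      have hp : d.pop? k = none := by simp [PySem.Dict.pop?, hg]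
      rw [hp]
      apply PySem.Dict.ext
      have hf : d.items.find? (fun p => p.1 == k) = none := by
        simp only [PySem.Dict.get?] at hg
        exact Option.map_eq_none_iff.mp hg
      have hno : ∀ p ∈ d.items, (p.1 == k) = false := by
        intro p hp'
        simpa using List.find?_eq_none.mp hf p hp'
      show d.items = _
      symm
      apply List.filter_eq_self.mpr
      intro p hp'
      simp [hno p hp']
  | some v =>
      have hp : d.pop? k = some (v, d.erase k) := by simp [PySem.Dict.pop?, hg]
      rw [hp]
      rfl

-- B's single pass, fully characterised
lemma pvFoldB_items (S : PySem.Set String) (l : List (String × String)) (r : PySem.Dict String String)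
    (hnd : r.keys.Nodup)
    (hfresh : ∀ p ∈ l, r.contains p.1 = false)
    (hlk : (l.map Prod.fst).Nodup) :
    (l.foldl (fun (r : PySem.Dict String String) kv =>
        if (PySem.Set.ofList ["connection"]).contains kv.1 then r
        else if S.contains kv.1 && decide (4 < PySem.Str.len kv.2) then
          r.insert kv.1 ("*****" ++ PySem.Str.slice kv.2 (some (-4)) none)
        else r.insert kv.1 kv.2) r).items
      = r.items ++ (l.filter (fun p => !(p.1 == "connection"))).map (pvMark S) := by
  simp only [← pvObf_def]
  induction l generalizing r with
  | nil => simp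
  | cons q l ih =>
      rw [List.foldl_cons, List.filter_cons]
      have hq : r.contains q.1 = false := hfresh q List.mem_cons_self
      have hlk' : (l.map Prod.fst).Nodup := List.Nodup.of_cons (by simpa using hlk)
      by_cases hcq : q.1 = "connection"
      · have hb : (PySem.Set.ofList ["connection"]).contains q.1 = true := by
          rw [pvSetContains]; simp [hcq]
        rw [if_pos hb]
        rw [ih r hnd (fun p hp => hfresh p (List.mem_cons_of_mem _ hp)) hlk']
        have hdrop : (!(q.1 == "connection")) = false := by simp [hcq]
        rw [if_neg (by intro hcon; rw [hdrop] at hcon; exact Bool.noConfusion hcon)]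
      · have hb : (PySem.Set.ofList ["connection"]).contains q.1 = false := by
          rw [pvSetContains]
          exact decide_eq_false (by simp [hcq])
        rw [if_neg (by intro hcon; rw [hb] at hcon; exact Bool.noConfusion hcon)]
        have hq' : q.1 ∉ r.keys := by
          intro hm
          rw [(PySem.Dict.contains_iff_mem_keys r q.1).mpr hm] at hq
          exact Bool.noConfusion hq
        have hins : ∀ w : String, (r.insert q.1 w).items = r.items ++ [(q.1, w)] :=
          fun w => PySem.Dict.items_insert_of_not_contains r w hq
        have hnd' : ∀ w : String, (r.insert q.1 w).keys.Nodup := by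
          intro w
          rw [PySem.Dict.keys_insert_of_not_contains r w hq]
          refine List.Nodup.append hnd (List.nodup_singleton _) ?_
          exact fun a ha hb' => hq' ((List.mem_singleton.mp hb') ▸ ha)
        have hq1 : q.1 ∉ l.map Prod.fst := by
          have := hlk
          simp only [List.map_cons, List.nodup_cons] at this
          exact this.1
        have hfresh' : ∀ (w : String), ∀ p ∈ l, (r.insert q.1 w).contains p.1 = false := by
          intro w p hp
          rw [PySem.Dict.contains_insert]
          have h1 : p.1 ≠ q.1 := fun he => hq1 (he ▸ List.mem_map_of_mem hp)
          simp [h1, hfresh p (List.mem_cons_of_mem _ hp)]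
        have hkeep : (!(q.1 == "connection")) = true := by simp [hcq]
        by_cases hc : (S.contains q.1 && decide (4 < PySem.Str.len q.2)) = true
        · rw [if_pos hc]
          rw [ih _ (hnd' _) (hfresh' _) hlk', hins, if_pos hkeep, List.map_cons]
          have hFq : pvMark S q = (q.1, pvObf q.2) := by unfold pvMark; rw [if_pos hc]
          rw [hFq]
          simp
        · rw [if_neg hc]
          rw [ih _ (hnd' _) (hfresh' _) hlk', hins, if_pos hkeep, List.map_cons]
          have hFq : pvMark S q = q := by unfold pvMark; rw [if_neg hc]
          rw [hFq]
          simp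

-- A, characterised as filter + map
lemma pvA_eq (headers : List (String × String)) (sens : List String)
    (hnd : (headers.map Prod.fst).Nodup) :
    obfuscate_sensitive_headers headers sens
      = (headers.filter (fun p => !(p.1 == "connection"))).map
          (pvMark (PySem.Set.ofList (sens.map PySem.Str.lower))) := by
  simp only [obfuscate_sensitive_headers, List.foldl_cons, List.foldl_nil]
  rw [show PySem.Str.lower "connection" = "connection" from by decide]
  rw [pvPop_eq]
  rw [pvFoldA_items sens _ (by
    show ((((PySem.Dict.mk headers).items.filter (fun p => !(p.1 == "connection")))).map (fun x => x.1)).Nodup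
    exact hnd.sublist (List.Sublist.map _ List.filter_sublist))]

-- B, characterised as the same filter + map
lemma pvB_eq (headers : List (String × String)) (sens : List String)
    (hnd : (headers.map Prod.fst).Nodup) :
    obfuscate_sensitive_headers_alt headers sens
      = (headers.filter (fun p => !(p.1 == "connection"))).map
          (pvMark (PySem.Set.ofList (sens.map PySem.Str.lower))) := by
  simp only [obfuscate_sensitive_headers_alt, List.map_cons, List.map_nil,
    show PySem.Str.lower "connection" = "connection" from by decide]
  rw [pvFoldB_items (PySem.Set.ofList (sens.map PySem.Str.lower)) headers PySem.Dict.empty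
    List.nodup_nil (fun p _ => PySem.Dict.contains_empty p.1) hnd]
  rfl

-- ===== VERDICT (by name: the statement is the Claim_ definition above) =====
theorem obfuscate_sensitive_headers_spec : Claim_equal_obfuscate_sensitive_headers := by
  intro headers sens _ hpre
  unfold Spec_obfuscate_sensitive_headers
  rw [pvA_eq headers sens hpre, pvB_eq headers sens hpre]
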